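-- pv_equiv track=rewrite | github.com/natecard/agent-recall | src/agent_recall/core/compact.py | _trim_recent_lines
-- ===== SOURCE A (Python) =====
-- def _trim_recent_lines(lines: list[str], token_budget: int) -> list[str]:
--     if token_budget <= 0:
--         return lines
--     # Approximate tokens ~= chars/4 to keep budget deterministic and cheap.
--     budget_chars = token_budget * 4
--     kept: list[str] = []
--     total = 0
--     for line in lines:
--         next_total = total + len(line) + 1
--         if kept and next_total > budget_chars:
--             break
--         kept.append(line)
--         total = next_total
--     return kept
-- ===== SOURCE B (Python) =====
-- from itertools import accumulate
--
--
-- def _trim_recent_lines(lines: list[str], token_budget: int) -> list[str]: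
--     if token_budget <= 0:
--         return lines
--     budget_chars = token_budget * 4
--     # Table: cums[i] = sum of (len(lines[j]) + 1) for j in 0..i.
--     cums = list(accumulate(len(line) + 1 for line in lines))
--     # First line is always kept, so the cutoff search starts at index 1.
--     cutoff = len(lines)
--     for i in range(1, len(lines)):
--         if cums[i] > budget_chars:
--             cutoff = i
--             break
--     return lines[:cutoff]
-- ===== Notes on version B (the rewrite author's own statement) =====
-- stated objective: alternative
-- what changed: Replaces the interleaved accumulate-and-append loop with a precomputed cumulative-cost table, an index scan for the first over-budget position (starting at 1, so the first line is always kept), and a single slice.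
import Mathlib
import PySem

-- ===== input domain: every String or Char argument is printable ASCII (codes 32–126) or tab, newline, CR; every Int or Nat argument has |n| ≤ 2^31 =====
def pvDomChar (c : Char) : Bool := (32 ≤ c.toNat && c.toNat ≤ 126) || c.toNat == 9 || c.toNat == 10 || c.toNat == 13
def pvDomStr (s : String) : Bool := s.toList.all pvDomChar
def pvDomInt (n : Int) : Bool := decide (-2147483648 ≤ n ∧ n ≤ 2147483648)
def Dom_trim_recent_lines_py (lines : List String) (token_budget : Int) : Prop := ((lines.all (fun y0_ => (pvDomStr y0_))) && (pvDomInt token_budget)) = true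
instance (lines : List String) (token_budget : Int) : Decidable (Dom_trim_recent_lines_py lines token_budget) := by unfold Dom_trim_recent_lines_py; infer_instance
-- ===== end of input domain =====

-- B replaces A's interleaved accumulate-and-append loop with a precomputed
-- cumulative-cost table, an index scan for the first over-budget position
-- (starting at 1), and a single slice (objective: alternative decomposition).


-- ===== PORT A =====
-- the `for line in lines` loop with `kept`, `total` and `break`
def trimA_loop (budget : Int) : List String → List String → Int → List String
  | [], kept, _ => kept
  | line :: rest, kept, total =>
    let next_total := total + PySem.Str.len line + 1
    if kept ≠ [] ∧ next_total > budget then kept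
    else trimA_loop budget rest (kept ++ [line]) next_total

def trim_recent_lines_py (lines : List String) (token_budget : Int) : List String :=
  if token_budget ≤ 0 then lines
  else trimA_loop (token_budget * 4) lines [] 0

-- ===== PORT B =====
-- itertools.accumulate(len(line) + 1 for line in lines)
def accumCosts : List String → Int → List Int
  | [], _ => []
  | line :: rest, acc =>
    let a := acc + PySem.Str.len line + 1
    a :: accumCosts rest a

-- `for i in range(1, len(lines))` scan with `break`; cums[i] is an in-range
-- index (i < n = cums.length), so `getD` is exact for Python's cums[i]
def findCut (cums : List Int) (budget : Int) (n : Nat) (i : Nat) : Nat :=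
  if i < n then
    if cums.getD i 0 > budget then i
    else findCut cums budget n (i + 1)
  else n
termination_by n - i

def trim_recent_lines_py_alt (lines : List String) (token_budget : Int) : List String :=
  if token_budget ≤ 0 then lines
  else
    let budget_chars := token_budget * 4
    let cums := accumCosts lines 0
    let cutoff := findCut cums budget_chars lines.length 1
    -- lines[:cutoff] with a nonnegative in-range cutoff is List.take
    lines.take cutoff

-- ===== PRECONDITION & SPEC =====
def Spec_trim_recent_lines_py (lines : List String) (token_budget : Int) (out : List String) : Prop := out = trim_recent_lines_py_alt lines token_budget
instance (lines : List String) (token_budget : Int) (out : List String) : Decidable (Spec_trim_recent_lines_py lines token_budget out) := by unfold Spec_trim_recent_lines_py; infer_instance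

-- ===== CLAIM (what is proved, stated in full; the proofs are below) =====
def Claim_equal_trim_recent_lines_py : Prop := ∀ (lines : List String) (token_budget : Int), Dom_trim_recent_lines_py lines token_budget → Spec_trim_recent_lines_py lines token_budget (trim_recent_lines_py lines token_budget)

-- ===== LEMMAS AND PROOFS =====

-- number of further lines A keeps, starting from running total t
def cnt (b : Int) : List String → Int → Nat
  | [], _ => 0
  | x :: xs, t =>
    if t + PySem.Str.len x + 1 > b then 0
    else 1 + cnt b xs (t + PySem.Str.len x + 1)

-- cost of the first i lines
def prefCost (xs : List String) (i : Nat) : Int :=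
  ((xs.take i).map (fun s => PySem.Str.len s + 1)).sum

theorem trimA_loop_nonempty (b : Int) (xs : List String) :
    ∀ (kept : List String) (t : Int), kept ≠ [] →
      trimA_loop b xs kept t = kept ++ (xs.take (cnt b xs t)) := by
  induction xs with
  | nil => intro kept t _; simp [trimA_loop, cnt]
  | cons x xs ih =>
    intro kept t hk
    simp only [trimA_loop, cnt, hk, ne_eq, not_false_iff, true_and]
    split_ifs with h
    · simp
    · rw [ih (kept ++ [x]) _ (by simp)]
      simp [Nat.one_add, List.take_succ_cons]

theorem accumCosts_getD (xs : List String) :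
    ∀ (t : Int) (i : Nat), i < xs.length →
      (accumCosts xs t).getD i 0 = t + prefCost xs (i + 1) := by
  induction xs with
  | nil => intro t i h; simp at h
  | cons x xs ih =>
    intro t i h
    cases i with
    | zero => simp [accumCosts, prefCost]; ring
    | succ i =>
      simp only [accumCosts, List.getD_cons_succ]
      rw [ih (t + PySem.Str.len x + 1) i (by simpa using h)]
      simp [prefCost, List.take_succ_cons]
      ring

theorem prefCost_succ (xs : List String) (i : Nat) (h : i < xs.length) :
    prefCost xs (i + 1) = prefCost xs i + PySem.Str.len xs[i] + 1 := by
  unfold prefCost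
  rw [List.take_add_one, List.getElem?_eq_getElem h]
  simp only [Option.toList_some, List.map_append, List.sum_append, List.map_cons,
    List.map_nil, List.sum_cons, List.sum_nil]
  simp [PySem.Str.len]
  ring

theorem findCut_eq_cnt (b : Int) (lines : List String) :
    ∀ (i : Nat), i ≤ lines.length →
      findCut (accumCosts lines 0) b lines.length i
        = i + cnt b (lines.drop i) (prefCost lines i) := by
  intro i hi
  induction hn : lines.length - i generalizing i with
  | zero =>
    have : i = lines.length := by omega
    subst this
    rw [findCut]
    simp [cnt]
  | succ k ih =>
    have hlt : i < lines.length := by omega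
    rw [findCut]
    simp only [hlt, if_true]
    rw [accumCosts_getD lines 0 i hlt, List.drop_eq_getElem_cons hlt]
    simp only [zero_add, cnt]
    rw [prefCost_succ lines i hlt]
    split_ifs with h
    · simp
    · rw [ih (i + 1) (by omega) (by omega), prefCost_succ lines i hlt]
      omega

-- ===== VERDICT (by name: the statement is the Claim_ definition above) =====
theorem trim_recent_lines_py_spec : Claim_equal_trim_recent_lines_py := by
  intro lines token_budget _
  unfold Spec_trim_recent_lines_py trim_recent_lines_py trim_recent_lines_py_alt
  by_cases hb : token_budget ≤ 0
  · simp [hb]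
  · simp only [hb, if_false]
    cases lines with
    | nil => simp [trimA_loop, findCut]
    | cons l rest =>
      rw [findCut_eq_cnt (token_budget * 4) (l :: rest) 1 (by simp)]
      simp only [trimA_loop, ne_eq, not_true_eq_false, false_and, if_false,
        List.drop_succ_cons, List.drop_zero]
      rw [trimA_loop_nonempty _ _ ([] ++ [l]) _ (by simp)]
      have hp : prefCost (l :: rest) 1 = 0 + PySem.Str.len l + 1 := by
        simp [prefCost]
      rw [hp]
      simp [Nat.one_add, List.take_succ_cons]
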